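-- pv_equiv track=rewrite | github.com/Novus-Engine/novuspack | scripts/lib/_go_code_utils.py | is_in_go_code_block
-- ===== SOURCE A (Python) =====
-- def is_in_go_code_block(content: str, line_num: int) -> bool:
--     """
--     Check if a given line number is inside a Go code block.
--
--     Args:
--         content: Markdown content as string
--         line_num: Line number to check (1-indexed)
--
--     Returns:
--         True if the line is inside a ```go code block
--     """
--     lines = content.split('\n')
--     in_go_block = False
--
--     for i, line in enumerate(lines[:line_num], 1):
--         if line.strip() == '```go':
--             in_go_block = True
--         elif line.strip() == '```' and in_go_block:
--             in_go_block = False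
--
--     return in_go_block
-- ===== SOURCE B (Python) =====
-- def is_in_go_code_block(content: str, line_num: int) -> bool:
--     for line in reversed(content.split('\n')[:line_num]):
--         s = line.strip()
--         if s == '```go':
--             return True
--         if s == '```':
--             return False
--     return False
-- ===== Notes on version B (the rewrite author's own statement) =====
-- stated objective: simpler
-- what changed: B replaces A's forward scan with a toggled boolean by a reverse scan of the same slice that returns at the first fence line ('```go' -> True, '```' -> False), maintaining no state.
import Mathlib
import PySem

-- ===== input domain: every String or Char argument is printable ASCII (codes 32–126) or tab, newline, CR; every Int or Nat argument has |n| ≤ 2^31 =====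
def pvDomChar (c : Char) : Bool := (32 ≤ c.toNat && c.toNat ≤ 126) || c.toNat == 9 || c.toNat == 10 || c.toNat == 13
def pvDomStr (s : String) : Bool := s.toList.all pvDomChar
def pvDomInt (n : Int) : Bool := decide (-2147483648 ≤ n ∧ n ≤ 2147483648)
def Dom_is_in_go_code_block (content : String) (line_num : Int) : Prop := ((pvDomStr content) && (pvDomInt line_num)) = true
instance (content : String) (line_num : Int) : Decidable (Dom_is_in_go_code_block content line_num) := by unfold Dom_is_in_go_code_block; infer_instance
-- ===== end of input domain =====

-- B scans the same slice in reverse and decides at the first fence line, instead of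
-- A's forward scan with a toggled boolean; structurally different, same cost.

-- ===== PORT A =====
-- literal port of A: split, slice lines[:line_num], forward fold with the in_go_block flag
def is_in_go_code_block (content : String) (line_num : Int) : Bool :=
  let lines := (PySem.Str.split? content "\n").getD []
  (PySem.List.slice lines none (some line_num)).foldl
    (fun in_go_block line =>
      if PySem.Str.strip line = "```go" then true
      else if PySem.Str.strip line = "```" && in_go_block then false
      else in_go_block) false

-- ===== PORT B =====
-- B's loop over reversed(lines[:line_num]): first fence decides, no state
def goFenceScan : List String → Bool
  | [] => false
  | line :: rest =>
    let s := PySem.Str.strip line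
    if s = "```go" then true
    else if s = "```" then false
    else goFenceScan rest

def is_in_go_code_block_alt (content : String) (line_num : Int) : Bool :=
  goFenceScan (PySem.List.slice ((PySem.Str.split? content "\n").getD []) none (some line_num)).reverse

-- ===== PRECONDITION & SPEC =====
def Spec_is_in_go_code_block (content : String) (line_num : Int) (out : Bool) : Prop := out = is_in_go_code_block_alt content line_num
instance (content : String) (line_num : Int) (out : Bool) : Decidable (Spec_is_in_go_code_block content line_num out) := by unfold Spec_is_in_go_code_block; infer_instance

-- ===== CLAIM (what is proved, stated in full; the proofs are below) =====
def Claim_equal_is_in_go_code_block : Prop := ∀ (content : String) (line_num : Int), Dom_is_in_go_code_block content line_num → Spec_is_in_go_code_block content line_num (is_in_go_code_block content line_num)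

-- ===== LEMMAS AND PROOFS =====

-- A's step function
def pvStep (b : Bool) (line : String) : Bool :=
  if PySem.Str.strip line = "```go" then true
  else if PySem.Str.strip line = "```" && b then false
  else b

-- reverse scan generalized over the value returned when no fence is found
def pvScanD (b : Bool) : List String → Bool
  | [] => b
  | line :: rest =>
    let s := PySem.Str.strip line
    if s = "```go" then true
    else if s = "```" then false
    else pvScanD b rest

lemma pvScanD_false (ys : List String) : pvScanD false ys = goFenceScan ys := by
  induction ys with
  | nil => rfl
  | cons h t ih => simp [pvScanD, goFenceScan, ih]

lemma pvScanD_concat (b : Bool) (ys : List String) (x : String) :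
    pvScanD b (ys ++ [x]) = pvScanD (pvStep b x) ys := by
  induction ys with
  | nil =>
    simp only [List.nil_append, pvScanD, pvStep]
    by_cases hgo : PySem.Str.strip x = "```go"
    · simp [hgo]
    · by_cases hcl : PySem.Str.strip x = "```"
      · cases b <;> simp [hcl]
      · simp [hgo, hcl]
  | cons h t ih =>
    simp only [List.cons_append, pvScanD, ih]

lemma foldl_eq_scan (xs : List String) (b : Bool) :
    xs.foldl pvStep b = pvScanD b xs.reverse := by
  induction xs generalizing b with
  | nil => rfl
  | cons h t ih =>
    simp only [List.foldl_cons, List.reverse_cons, ih, pvScanD_concat]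

-- ===== VERDICT (by name: the statement is the Claim_ definition above) =====
theorem is_in_go_code_block_spec : Claim_equal_is_in_go_code_block := by
  intro content line_num _
  show _ = _
  unfold is_in_go_code_block is_in_go_code_block_alt
  rw [show (fun in_go_block line =>
      if PySem.Str.strip line = "```go" then true
      else if PySem.Str.strip line = "```" && in_go_block then false
      else in_go_block) = pvStep from rfl]
  rw [foldl_eq_scan, pvScanD_false]
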